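-- pv_equiv track=rewrite | github.com/jfandre00/Clube-de-Programacao-Exercicios-Propostos | Exercícios/beecrowd 1266 mais simples aceito.py | calcular_postes
-- ===== SOURCE A (Python) =====
-- def calcular_postes(cerca):
--     n = len(cerca)
--     postes = 0
--
--     #bons = [i for i in range(n) if cerca[i] == "1"] - solução usando list comprehension
--     #lista para armazenar as posições dos postes
--     bons = []
--
--     # Vai buscar todos os índices possíveis na lista cerca
--     for i in range(n):
--     # Verifica se existe um poste na posição
--         if cerca[i] == "1":
--         # Se estiver presente, adiciona a posição i (index) à lista bons
--             bons.append(i)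
--
--     if len(bons) > 0:
--         # Calcula a distância entre postes existentes
--         for i in range(len(bons) - 1):
--             dist = bons[i + 1] - bons[i]
--             postes += (dist - 1) // 2
--
--         # Calcula a distância entre o último e o primeiro poste (cerca circular)
--         dist = n - bons[-1] + bons[0]
--         postes += (dist - 1) // 2
--     else:
--         # Se não há postes, coloca o mínimo necessário
--         postes = (n + 1) // 2
--
--     return postes
-- ===== SOURCE B (Python) =====
-- def calcular_postes(cerca):
--     total = 0
--     zeros = 0
--     lead = 0
--     seen = False
--     for c in cerca:
--         if c == "1":
--             if seen:
--                 total += zeros // 2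
--             else:
--                 lead = zeros
--                 seen = True
--             zeros = 0
--         else:
--             zeros += 1
--     if seen:
--         return total + (zeros + lead) // 2
--     return (len(cerca) + 1) // 2
-- ===== Notes on version B (the rewrite author's own statement) =====
-- stated objective: simpler
-- what changed: Replaces A's two-pass scheme (build the list of pole positions, then sum (gap-1)//2 over consecutive pairs plus a circular wrap term) by a single left-to-right scan that keeps only a running total, the zero-run since the last pole, the leading zero-run and a seen flag, merging the trailing and leading runs at the end; no positions list is built.
import Mathlib
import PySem

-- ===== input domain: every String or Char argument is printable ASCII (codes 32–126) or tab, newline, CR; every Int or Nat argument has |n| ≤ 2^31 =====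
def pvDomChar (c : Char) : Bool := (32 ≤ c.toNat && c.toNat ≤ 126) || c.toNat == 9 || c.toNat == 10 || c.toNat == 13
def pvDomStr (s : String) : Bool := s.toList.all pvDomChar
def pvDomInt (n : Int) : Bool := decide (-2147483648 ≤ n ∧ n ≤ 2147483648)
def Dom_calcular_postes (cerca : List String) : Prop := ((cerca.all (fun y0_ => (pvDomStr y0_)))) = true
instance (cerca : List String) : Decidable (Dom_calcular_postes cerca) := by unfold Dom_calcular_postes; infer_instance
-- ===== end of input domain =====

-- B replaces A's positions-list + pairwise-difference passes by one accumulating scan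
-- that tracks the zero-run since the last pole (objective: simpler, one pass, O(1) extra space).

-- ===== PORT A =====
def calcular_postes (cerca : List String) : Int :=
  let n : Int := (cerca.length : Int)
  -- bons: positions of "1", built by the explicit loop over range(n)
  let bons : List Int :=
    (PySem.List.pyRange 0 n 1).foldl
      (fun b i => if PySem.List.pyGetD cerca i "" = "1" then b ++ [i] else b) []
  if bons.length > 0 then
    -- sum of (dist - 1) // 2 over consecutive pairs
    let postes : Int :=
      (PySem.List.pyRange 0 ((bons.length : Int) - 1) 1).foldl
        (fun postes i =>
          let dist := PySem.List.pyGetD bons (i + 1) 0 - PySem.List.pyGetD bons i 0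
          postes + PySem.Int.floordiv (dist - 1) 2) 0
    let dist := n - PySem.List.pyGetD bons (-1) 0 + PySem.List.pyGetD bons 0 0
    postes + PySem.Int.floordiv (dist - 1) 2
  else
    PySem.Int.floordiv (n + 1) 2

-- ===== PORT B =====
-- state: (total, zeros since last pole, leading zero run, pole seen)
def pvStepB (s : Int × Int × Int × Bool) (c : String) : Int × Int × Int × Bool :=
  if c = "1" then
    if s.2.2.2 then (s.1 + PySem.Int.floordiv s.2.1 2, 0, s.2.2.1, true)
    else (s.1, 0, s.2.1, true)
  else (s.1, s.2.1 + 1, s.2.2.1, s.2.2.2)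

def calcular_postes_alt (cerca : List String) : Int :=
  let s := cerca.foldl pvStepB (0, 0, 0, false)
  if s.2.2.2 then s.1 + PySem.Int.floordiv (s.2.1 + s.2.2.1) 2
  else PySem.Int.floordiv ((cerca.length : Int) + 1) 2

-- ===== PRECONDITION & SPEC =====
def Spec_calcular_postes (cerca : List String) (out : Int) : Prop := out = calcular_postes_alt cerca
instance (cerca : List String) (out : Int) : Decidable (Spec_calcular_postes cerca out) := by unfold Spec_calcular_postes; infer_instance

-- ===== CLAIM (what is proved, stated in full; the proofs are below) =====
def Claim_equal_calcular_postes : Prop := ∀ (cerca : List String), Dom_calcular_postes cerca → Spec_calcular_postes cerca (calcular_postes cerca)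

-- ===== LEMMAS AND PROOFS =====

-- the positions of "1" in cerca, as A's first loop produces them
def polePos (cerca : List String) : List Int :=
  (PySem.List.pyRange 0 (cerca.length : Int) 1).filter
    (fun i => decide (PySem.List.pyGetD cerca i "" = "1"))

-- sum of (gap - 1) // 2 over consecutive pairs
def pairSum : List Int → Int
  | a :: b :: rest => PySem.Int.floordiv (b - a - 1) 2 + pairSum (b :: rest)
  | _ => 0

theorem pairSum_single (a : Int) : pairSum [a] = 0 := rfl

theorem bons_eq_polePos (cerca : List String) :
    (PySem.List.pyRange 0 (cerca.length : Int) 1).foldl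
      (fun b i => if PySem.List.pyGetD cerca i "" = "1" then b ++ [i] else b) []
    = polePos cerca := by
  rw [PySem.List.foldl_append_ite_eq_filter]
  rfl

theorem polePos_append (xs : List String) (x : String) :
    polePos (xs ++ [x])
      = polePos xs ++ (if x = "1" then [(xs.length : Int)] else []) := by
  unfold polePos
  have hlen : (((xs ++ [x]).length : Nat) : Int) = (xs.length : Int) + 1 := by
    simp
  rw [hlen, PySem.List.pyRange_one_succ_right (by positivity), List.filter_append]
  congr 1
  · apply List.filter_congr
    intro i hi
    have h := (PySem.List.mem_pyRange_one.mp hi)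
    have h0 : (0:Int) ≤ i := h.1
    have h1 : i < (xs.length : Int) := h.2
    rw [PySem.List.pyGetD_eq_getElem (xs ++ [x]) "" h0 (by simp; omega),
        PySem.List.pyGetD_eq_getElem xs "" h0 (by exact_mod_cast h1),
        List.getElem_append_left (by omega)]
  · by_cases hx : x = "1" <;>
      simp [List.filter, List.getD, hx]

theorem pairSum_append_singleton :
    ∀ (l : List Int), l ≠ [] → ∀ (m : Int),
      pairSum (l ++ [m]) = pairSum l + PySem.Int.floordiv (m - l.getLastD 0 - 1) 2
  | [], h, _ => absurd rfl h
  | [a], _, m => by simp [pairSum]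
  | a :: b :: rest, _, m => by
    have ih := pairSum_append_singleton (b :: rest) (by simp) m
    simp only [List.cons_append, pairSum] at *
    rw [ih]
    simp [List.getLastD]
    ring

-- B's loop invariant, by induction from the right
theorem B_inv (xs : List String) :
    xs.foldl pvStepB (0, 0, 0, false)
      = (if polePos xs = [] then ((0:Int), (xs.length : Int), (0:Int), false)
         else (pairSum (polePos xs), (xs.length : Int) - 1 - (polePos xs).getLastD 0,
               (polePos xs).headD 0, true)) := by
  induction xs using List.reverseRecOn with
  | nil => simp [polePos, PySem.List.pyRange]
  | append_singleton xs x ih =>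
    rw [List.foldl_append, ih, polePos_append]
    by_cases hx : x = "1"
    · subst hx
      by_cases hps : polePos xs = []
      · simp only [reduceIte]
        simp [hps, pvStepB, List.foldl, pairSum_single]
      · have hne : polePos xs ++ [(xs.length : Int)] ≠ [] := by simp
        simp only [reduceIte]
        rw [if_neg hps, if_neg hne]
        have hhead : (polePos xs ++ [(xs.length : Int)]).headD 0 = (polePos xs).headD 0 := by
          rcases List.exists_cons_of_ne_nil hps with ⟨a, t, h⟩
          simp [h]
        simp only [List.foldl, pvStepB, pairSum_append_singleton _ hps, hhead]
        simp
        congr 1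
        ring
    · by_cases hps : polePos xs = []
      · simp [hps, hx, pvStepB, List.foldl]
      · simp [hps, hx, pvStepB, List.foldl]
        ring

theorem loop_core :
    ∀ (l : List Int) (a acc : Int),
      List.foldl
        (fun acc (k : Nat) =>
          acc + PySem.Int.floordiv (((a :: l).getD (k + 1) 0 - (a :: l).getD k 0) - 1) 2)
        acc (List.range l.length)
      = acc + pairSum (a :: l)
  | [], a, acc => by simp [pairSum]
  | b :: rest, a, acc => by
    rw [show (b :: rest).length = rest.length + 1 from rfl, List.range_succ_eq_map,
        List.foldl_cons, List.foldl_map]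
    have ih := loop_core rest b
      (acc + PySem.Int.floordiv ((a :: b :: rest).getD 1 0 - (a :: b :: rest).getD 0 0 - 1) 2)
    have hfun :
        (fun (acc : Int) (k : Nat) =>
          acc + PySem.Int.floordiv (((a :: b :: rest).getD (k.succ + 1) 0
            - (a :: b :: rest).getD k.succ 0) - 1) 2)
        = (fun (acc : Int) (k : Nat) =>
          acc + PySem.Int.floordiv (((b :: rest).getD (k + 1) 0 - (b :: rest).getD k 0) - 1) 2) := by
      funext acc k
      simp
    rw [hfun, ih]
    simp [pairSum, List.getD]
    ring

theorem loopA (l : List Int) (a acc : Int) :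
    (PySem.List.pyRange 0 (((a :: l).length : Int) - 1) 1).foldl
      (fun postes i =>
        postes + PySem.Int.floordiv
          ((PySem.List.pyGetD (a :: l) (i + 1) 0 - PySem.List.pyGetD (a :: l) i 0) - 1) 2)
      acc
    = acc + pairSum (a :: l) := by
  have hl : (((a :: l).length : Int) - 1) = (l.length : Int) := by simp
  rw [hl, PySem.List.pyRange_one, List.foldl_map]
  have hfun :
      (fun (postes : Int) (k : Nat) =>
        postes + PySem.Int.floordiv
          ((PySem.List.pyGetD (a :: l) ((0 + (k : Int)) + 1) 0
            - PySem.List.pyGetD (a :: l) (0 + (k : Int)) 0) - 1) 2)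
      = (fun (postes : Int) (k : Nat) =>
        postes + PySem.Int.floordiv (((a :: l).getD (k + 1) 0 - (a :: l).getD k 0) - 1) 2) := by
    funext postes k
    have h1 : (0 + (k : Int)) + 1 = ((k + 1 : Nat) : Int) := by omega
    have h2 : (0 + (k : Int)) = ((k : Nat) : Int) := by omega
    rw [h1, h2, PySem.List.pyGetD_natCast, PySem.List.pyGetD_natCast]
  have hrange : ((l.length : Int) - 0).toNat = l.length := by simp
  rw [hrange, hfun, loop_core]

-- ===== VERDICT (by name: the statement is the Claim_ definition above) =====
theorem calcular_postes_spec : Claim_equal_calcular_postes := by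
  intro cerca _
  unfold Spec_calcular_postes
  simp only [calcular_postes, calcular_postes_alt]
  rw [bons_eq_polePos, B_inv]
  by_cases hps : polePos cerca = []
  · simp [hps]
  · rw [if_neg hps]
    rcases List.exists_cons_of_ne_nil hps with ⟨a, l, hal⟩
    rw [hal]
    rw [if_pos (by simp : (a :: l).length > 0), loopA]
    rw [PySem.List.pyGetD_neg_one _ _ (by simp), PySem.List.pyGetD_zero_cons]
    have hlast : (a :: l).getLast (by simp) = (a :: l).getLastD 0 := by
      simp [List.getLastD_eq_getLast?, List.getLast?_eq_some_getLast]
    rw [hlast]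
    simp only [List.headD]
    congr 1
    · simp
    · congr 1
      ring
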